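-- pv_equiv track=rewrite | github.com/EduardoMSA/Proyectos_ISC_ITESM | Programas Python/Mammoths Genome Decoding.py | decoding
-- ===== SOURCE A (Python) =====
-- def decoding(s):
--     cuenta = [0]*4
--     cuenta[0]=s.count("A")
--     cuenta[1]=s.count("C")
--     cuenta[2]=s.count("G")
--     cuenta[3]=s.count("T")
--     faltantesA = max(cuenta)-cuenta[0]
--     faltantesC = max(cuenta)-cuenta[1]
--     faltantesG = max(cuenta)-cuenta[2]
--     faltantesT = max(cuenta)-cuenta[3]
--     faltantesTotales = faltantesA + faltantesC + faltantesG + faltantesT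
--     incognitas = s.count("?")
--     if(len(s)%4!=0 or faltantesTotales != incognitas):
--         return "==="
--     tmp1=s.replace("?","A",faltantesA)
--     tmp2=tmp1.replace("?","C",faltantesC)
--     tmp3=tmp2.replace("?","G",faltantesG)
--     s=tmp3.replace("?","T",faltantesT)
--     while s.count("?")!=0:
--         tmp1=s.replace("?","A",1)
--         tmp2=tmp1.replace("?","C",1)
--         tmp3=tmp2.replace("?","G",1)
--         s=tmp3.replace("?","T",1)
--
--     return s
-- ===== SOURCE B (Python) =====
-- def decoding(s):
--     counts = [s.count(c) for c in "ACGT"]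
--     m = max(counts)
--     na, nc, ng, nt = (m - c for c in counts)
--     if len(s) % 4 != 0 or na + nc + ng + nt != s.count("?"):
--         return "==="
--     out = []
--     for ch in s:
--         if ch == "?":
--             if na > 0:
--                 out.append("A"); na -= 1
--             elif nc > 0:
--                 out.append("C"); nc -= 1
--             elif ng > 0:
--                 out.append("G"); ng -= 1
--             elif nt > 0:
--                 out.append("T"); nt -= 1
--             else:
--                 out.append(ch)
--         else:
--             out.append(ch)
--     return "".join(out)
-- ===== Notes on version B (the rewrite author's own statement) =====
-- stated objective: simpler
-- what changed: Replaces the four chained str.replace(count) passes and the dead while-loop (four more replaces per iteration) by a single left-to-right pass that fills each placeholder character from a remaining-needs tally, so the string is traversed once instead of up to eight times.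
import Mathlib
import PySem

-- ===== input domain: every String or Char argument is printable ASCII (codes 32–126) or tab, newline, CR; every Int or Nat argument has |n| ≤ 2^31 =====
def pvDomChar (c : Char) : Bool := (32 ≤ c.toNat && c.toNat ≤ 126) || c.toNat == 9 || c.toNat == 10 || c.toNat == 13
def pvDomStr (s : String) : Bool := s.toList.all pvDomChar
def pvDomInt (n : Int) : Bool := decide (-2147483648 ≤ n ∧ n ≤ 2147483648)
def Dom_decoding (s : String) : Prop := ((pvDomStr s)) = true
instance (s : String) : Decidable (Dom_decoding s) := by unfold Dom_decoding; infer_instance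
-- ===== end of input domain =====

-- B replaces A's four chained str.replace(count) passes plus its dead while-loop by one
-- left-to-right fill pass over the string; same return value, simpler control flow.

-- ===== PORT A =====

-- hand port of Python str.replace(old, new, count) for a SINGLE-character pattern, the only
-- shape A uses: replaces the first `count` occurrences (count = 0 none; count < 0 all) — exact here.
def pvReplace (old new : Char) (k : Int) : List Char → List Char
  | [] => []
  | x :: xs =>
    if x = old ∧ k ≠ 0 then new :: pvReplace old new (k - 1) xs
    else x :: pvReplace old new k xs

-- one iteration of A's while-loop body
def pvStep (l : List Char) : List Char :=
  pvReplace '?' 'T' 1 (pvReplace '?' 'G' 1 (pvReplace '?' 'C' 1 (pvReplace '?' 'A' 1 l)))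

-- rewriting equations for pvReplace (cited by the termination proof of pvWhile below)
theorem pvReplace_cons_ne (o n : Char) (k : Int) (x : Char) (xs : List Char) (h : x ≠ o) :
    pvReplace o n k (x :: xs) = x :: pvReplace o n k xs := by
  simp [pvReplace, h]

theorem pvReplace_cons_hit (o n : Char) (k : Int) (xs : List Char) (h : k ≠ 0) :
    pvReplace o n k (o :: xs) = n :: pvReplace o n (k - 1) xs := by
  simp [pvReplace, h]

theorem pvReplace_zero (o n : Char) (l : List Char) : pvReplace o n 0 l = l := by
  induction l with
  | nil => rfl
  | cons x xs ih => simp [pvReplace, ih]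

-- termination facts for A's `while s.count("?") != 0` loop (cited by `decreasing_by`)
theorem pvReplace_count_le (n : Char) (hn : n ≠ '?') (k : Int) (l : List Char) :
    (pvReplace '?' n k l).count '?' ≤ l.count '?' := by
  induction l generalizing k with
  | nil => simp [pvReplace]
  | cons x xs ih =>
    by_cases hx : x = '?' ∧ k ≠ 0
    · obtain ⟨hx1, hx2⟩ := hx
      subst hx1
      rw [pvReplace_cons_hit _ _ _ _ hx2]
      have := ih (k - 1)
      simp only [List.count_cons]
      simp [hn]
      omega
    · simp only [pvReplace, if_neg hx, List.count_cons]
      have := ih k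
      omega

theorem pvReplace_one_count_lt (n : Char) (hn : n ≠ '?') (l : List Char)
    (h : 0 < l.count '?') : (pvReplace '?' n 1 l).count '?' < l.count '?' := by
  induction l with
  | nil => simp at h
  | cons x xs ih =>
    by_cases hx : x = '?'
    · subst hx
      rw [pvReplace_cons_hit _ _ _ _ (by norm_num)]
      norm_num [pvReplace_zero]
      simp [hn]
    · have hxs : 0 < xs.count '?' := by
        simp [hx] at h ⊢
        omega
      rw [pvReplace_cons_ne _ _ _ _ _ hx]
      have := ih hxs
      simp only [List.count_cons]
      omega

theorem pvStep_count_lt (l : List Char) (h : 0 < l.count '?') :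
    (pvStep l).count '?' < l.count '?' :=
  lt_of_le_of_lt
    (le_trans (pvReplace_count_le 'T' (by decide) 1 _)
      (le_trans (pvReplace_count_le 'G' (by decide) 1 _)
        (pvReplace_count_le 'C' (by decide) 1 _)))
    (pvReplace_one_count_lt 'A' (by decide) l h)

-- Chars.count with a one-character needle is List.count (the loop condition below uses it)
theorem count_go_singleton (c : Char) (l : List Char) : ∀ (fuel acc : Nat), l.length ≤ fuel →
    PySem.Chars.count.go [c] fuel l acc = acc + l.count c := by
  induction l with
  | nil => intro fuel acc _; cases fuel <;> simp [PySem.Chars.count.go]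
  | cons x t ih =>
    intro fuel acc h
    cases fuel with
    | zero => simp at h
    | succ f =>
      have ht : t.length ≤ f := by simp at h; omega
      by_cases hx : c = x
      · subst hx
        simp only [PySem.Chars.count.go]
        rw [if_pos (by simp [List.isPrefixOf])]
        simp [ih f (acc + 1) ht]
        omega
      · simp only [PySem.Chars.count.go]
        rw [if_neg (by simp [List.isPrefixOf]; exact hx)]
        simp [ih f acc ht, List.count_cons]
        exact fun hh => (hx hh.symm).elim

theorem count_singleton (l : List Char) (c : Char) : PySem.Chars.count l [c] = l.count c := by
  simp [PySem.Chars.count, count_go_singleton c l l.length 0 le_rfl]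

-- A's `while s.count("?") != 0: ...`
def pvWhile (l : List Char) : List Char :=
  if PySem.Chars.count l ['?'] ≠ 0 then pvWhile (pvStep l) else l
termination_by l.count '?'
decreasing_by
  rename_i h
  rw [count_singleton] at h
  exact pvStep_count_lt l (Nat.pos_of_ne_zero h)

def decoding (s : String) : String :=
  let cA := PySem.Str.count s "A"
  let cC := PySem.Str.count s "C"
  let cG := PySem.Str.count s "G"
  let cT := PySem.Str.count s "T"
  let m := max (max (max cA cC) cG) cT
  let fA := m - cA
  let fC := m - cC
  let fG := m - cG
  let fT := m - cT
  let tot := fA + fC + fG + fT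
  let inc := PySem.Str.count s "?"
  if PySem.Str.len s % 4 ≠ 0 ∨ tot ≠ inc then "==="
  else
    let t1 := pvReplace '?' 'A' (fA : Int) s.toList
    let t2 := pvReplace '?' 'C' (fC : Int) t1
    let t3 := pvReplace '?' 'G' (fG : Int) t2
    let t4 := pvReplace '?' 'T' (fT : Int) t3
    String.mk (pvWhile t4)

-- ===== PORT B =====

-- B's single left-to-right pass: fill each '?' from the remaining needs (A first, then C, G, T)
def pvFill : List Char → Nat → Nat → Nat → Nat → List Char
  | [], _, _, _, _ => []
  | x :: xs, a, c, g, t =>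
    if x = '?' then
      if 0 < a then 'A' :: pvFill xs (a - 1) c g t
      else if 0 < c then 'C' :: pvFill xs a (c - 1) g t
      else if 0 < g then 'G' :: pvFill xs a c (g - 1) t
      else if 0 < t then 'T' :: pvFill xs a c g (t - 1)
      else x :: pvFill xs a c g t
    else x :: pvFill xs a c g t

def decoding_alt (s : String) : String :=
  let cA := PySem.Str.count s "A"
  let cC := PySem.Str.count s "C"
  let cG := PySem.Str.count s "G"
  let cT := PySem.Str.count s "T"
  let m := max (max (max cA cC) cG) cT
  let nA := m - cA
  let nC := m - cC
  let nG := m - cG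
  let nT := m - cT
  if PySem.Str.len s % 4 ≠ 0 ∨ nA + nC + nG + nT ≠ PySem.Str.count s "?" then "==="
  else String.mk (pvFill s.toList nA nC nG nT)

-- ===== PRECONDITION & SPEC =====
def Spec_decoding (s : String) (out : String) : Prop := out = decoding_alt s
instance (s : String) (out : String) : Decidable (Spec_decoding s out) := by unfold Spec_decoding; infer_instance

-- ===== CLAIM (what is proved, stated in full; the proofs are below) =====
def Claim_equal_decoding : Prop := ∀ (s : String), Dom_decoding s → Spec_decoding s (decoding s)

-- ===== LEMMAS AND PROOFS =====

theorem pvReplace_coe_zero (o n : Char) (l : List Char) :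
    pvReplace o n ((0 : Nat) : Int) l = l := by
  rw [(by norm_num : ((0 : Nat) : Int) = 0), pvReplace_zero]

-- the four chained replaces compute exactly B's single fill pass
theorem chain_eq_fill (l : List Char) : ∀ (a c g t : Nat),
    pvReplace '?' 'T' (t : Int) (pvReplace '?' 'G' (g : Int)
      (pvReplace '?' 'C' (c : Int) (pvReplace '?' 'A' (a : Int) l)))
    = pvFill l a c g t := by
  induction l with
  | nil => intro a c g t; simp [pvReplace, pvFill]
  | cons x xs ih =>
    intro a c g t
    by_cases hx : x = '?'
    · subst hx
      by_cases ha : 0 < a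
      · rw [pvReplace_cons_hit _ _ _ _ (by omega),
          (by omega : ((a : Int) - 1) = ((a - 1 : Nat) : Int)),
          pvReplace_cons_ne _ _ _ _ _ (by decide),
          pvReplace_cons_ne _ _ _ _ _ (by decide),
          pvReplace_cons_ne _ _ _ _ _ (by decide)]
        simp only [pvFill, if_pos ha]
        exact congrArg _ (ih (a - 1) c g t)
      · have ha0 : a = 0 := by omega
        subst ha0
        rw [pvReplace_coe_zero]
        by_cases hc : 0 < c
        · rw [pvReplace_cons_hit _ _ _ _ (by omega),
            (by omega : ((c : Int) - 1) = ((c - 1 : Nat) : Int)),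
            pvReplace_cons_ne _ _ _ _ _ (by decide),
            pvReplace_cons_ne _ _ _ _ _ (by decide)]
          simp only [pvFill, if_neg (by omega : ¬ 0 < 0), if_pos hc]
          have := ih 0 (c - 1) g t
          rw [pvReplace_coe_zero] at this
          exact congrArg _ this
        · have hc0 : c = 0 := by omega
          subst hc0
          rw [pvReplace_coe_zero]
          by_cases hg : 0 < g
          · rw [pvReplace_cons_hit _ _ _ _ (by omega),
              (by omega : ((g : Int) - 1) = ((g - 1 : Nat) : Int)),
              pvReplace_cons_ne _ _ _ _ _ (by decide)]
            simp only [pvFill, if_neg (by omega : ¬ 0 < 0), if_pos hg]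
            have := ih 0 0 (g - 1) t
            rw [pvReplace_coe_zero, pvReplace_coe_zero] at this
            exact congrArg _ this
          · have hg0 : g = 0 := by omega
            subst hg0
            rw [pvReplace_coe_zero]
            by_cases ht : 0 < t
            · rw [pvReplace_cons_hit _ _ _ _ (by omega),
                (by omega : ((t : Int) - 1) = ((t - 1 : Nat) : Int))]
              simp only [pvFill, if_neg (by omega : ¬ 0 < 0), if_pos ht]
              have := ih 0 0 0 (t - 1)
              rw [pvReplace_coe_zero, pvReplace_coe_zero, pvReplace_coe_zero] at this
              exact congrArg _ this
            · have ht0 : t = 0 := by omega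
              subst ht0
              rw [pvReplace_coe_zero]
              simp only [pvFill, if_neg (by omega : ¬ 0 < 0)]
              have := ih 0 0 0 0
              rw [pvReplace_coe_zero, pvReplace_coe_zero, pvReplace_coe_zero,
                pvReplace_coe_zero] at this
              exact congrArg _ this
    · rw [pvReplace_cons_ne _ _ _ _ _ hx, pvReplace_cons_ne _ _ _ _ _ hx,
        pvReplace_cons_ne _ _ _ _ _ hx, pvReplace_cons_ne _ _ _ _ _ hx]
      simp only [pvFill, if_neg hx]
      exact congrArg _ (ih a c g t)

-- when the needs add up to the number of '?', the fill pass leaves no '?'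
theorem fill_count_zero (l : List Char) : ∀ (a c g t : Nat),
    l.count '?' = a + c + g + t → (pvFill l a c g t).count '?' = 0 := by
  induction l with
  | nil => intro a c g t _; simp [pvFill]
  | cons x xs ih =>
    intro a c g t h
    by_cases hx : x = '?'
    · subst hx
      have h' : xs.count '?' + 1 = a + c + g + t := by simpa using h
      by_cases ha : 0 < a
      · simp only [pvFill, if_pos ha]
        simp [ih (a - 1) c g t (by omega)]
      · by_cases hc : 0 < c
        · simp only [pvFill, if_neg ha, if_pos hc]
          simp [ih a (c - 1) g t (by omega)]
        · by_cases hg : 0 < g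
          · simp only [pvFill, if_neg ha, if_neg hc, if_pos hg]
            simp [ih a c (g - 1) t (by omega)]
          · have ht : 0 < t := by omega
            simp only [pvFill, if_neg ha, if_neg hc, if_neg hg, if_pos ht]
            simp [ih a c g (t - 1) (by omega)]
    · have h' : xs.count '?' = a + c + g + t := by simpa [hx] using h
      simp only [pvFill, if_neg hx]
      simp [hx, ih a c g t h']

theorem pvWhile_of_count_zero (l : List Char) (h : l.count '?' = 0) : pvWhile l = l := by
  rw [pvWhile, count_singleton, h]
  simp

theorem str_count_q (s : String) : PySem.Str.count s "?" = s.toList.count '?' := by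
  rw [PySem.Str.count_eq]
  exact count_singleton s.toList '?'

-- the ports with their local `let`s zeta-reduced (definitional)
theorem decoding_eq (s : String) : decoding s =
    (if PySem.Str.len s % 4 ≠ 0 ∨
        (max (max (max (PySem.Str.count s "A") (PySem.Str.count s "C")) (PySem.Str.count s "G"))
            (PySem.Str.count s "T") - PySem.Str.count s "A") +
        (max (max (max (PySem.Str.count s "A") (PySem.Str.count s "C")) (PySem.Str.count s "G"))
            (PySem.Str.count s "T") - PySem.Str.count s "C") +
        (max (max (max (PySem.Str.count s "A") (PySem.Str.count s "C")) (PySem.Str.count s "G"))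
            (PySem.Str.count s "T") - PySem.Str.count s "G") +
        (max (max (max (PySem.Str.count s "A") (PySem.Str.count s "C")) (PySem.Str.count s "G"))
            (PySem.Str.count s "T") - PySem.Str.count s "T") ≠ PySem.Str.count s "?"
     then "==="
     else String.mk (pvWhile (pvReplace '?' 'T'
        ((max (max (max (PySem.Str.count s "A") (PySem.Str.count s "C")) (PySem.Str.count s "G"))
            (PySem.Str.count s "T") - PySem.Str.count s "T" : Nat) : Int)
        (pvReplace '?' 'G'
        ((max (max (max (PySem.Str.count s "A") (PySem.Str.count s "C")) (PySem.Str.count s "G"))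
            (PySem.Str.count s "T") - PySem.Str.count s "G" : Nat) : Int)
        (pvReplace '?' 'C'
        ((max (max (max (PySem.Str.count s "A") (PySem.Str.count s "C")) (PySem.Str.count s "G"))
            (PySem.Str.count s "T") - PySem.Str.count s "C" : Nat) : Int)
        (pvReplace '?' 'A'
        ((max (max (max (PySem.Str.count s "A") (PySem.Str.count s "C")) (PySem.Str.count s "G"))
            (PySem.Str.count s "T") - PySem.Str.count s "A" : Nat) : Int) s.toList)))))) := rfl

theorem decoding_alt_eq (s : String) : decoding_alt s =
    (if PySem.Str.len s % 4 ≠ 0 ∨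
        (max (max (max (PySem.Str.count s "A") (PySem.Str.count s "C")) (PySem.Str.count s "G"))
            (PySem.Str.count s "T") - PySem.Str.count s "A") +
        (max (max (max (PySem.Str.count s "A") (PySem.Str.count s "C")) (PySem.Str.count s "G"))
            (PySem.Str.count s "T") - PySem.Str.count s "C") +
        (max (max (max (PySem.Str.count s "A") (PySem.Str.count s "C")) (PySem.Str.count s "G"))
            (PySem.Str.count s "T") - PySem.Str.count s "G") +
        (max (max (max (PySem.Str.count s "A") (PySem.Str.count s "C")) (PySem.Str.count s "G"))
            (PySem.Str.count s "T") - PySem.Str.count s "T") ≠ PySem.Str.count s "?"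
     then "==="
     else String.mk (pvFill s.toList
        (max (max (max (PySem.Str.count s "A") (PySem.Str.count s "C")) (PySem.Str.count s "G"))
            (PySem.Str.count s "T") - PySem.Str.count s "A")
        (max (max (max (PySem.Str.count s "A") (PySem.Str.count s "C")) (PySem.Str.count s "G"))
            (PySem.Str.count s "T") - PySem.Str.count s "C")
        (max (max (max (PySem.Str.count s "A") (PySem.Str.count s "C")) (PySem.Str.count s "G"))
            (PySem.Str.count s "T") - PySem.Str.count s "G")
        (max (max (max (PySem.Str.count s "A") (PySem.Str.count s "C")) (PySem.Str.count s "G"))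
            (PySem.Str.count s "T") - PySem.Str.count s "T"))) := rfl

-- ===== VERDICT (by name: the statement is the Claim_ definition above) =====
theorem decoding_spec : Claim_equal_decoding := by
  unfold Claim_equal_decoding
  intro s _
  unfold Spec_decoding
  rw [decoding_eq, decoding_alt_eq]
  by_cases hguard : PySem.Str.len s % 4 ≠ 0 ∨
      (max (max (max (PySem.Str.count s "A") (PySem.Str.count s "C")) (PySem.Str.count s "G"))
          (PySem.Str.count s "T") - PySem.Str.count s "A") +
      (max (max (max (PySem.Str.count s "A") (PySem.Str.count s "C")) (PySem.Str.count s "G"))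
          (PySem.Str.count s "T") - PySem.Str.count s "C") +
      (max (max (max (PySem.Str.count s "A") (PySem.Str.count s "C")) (PySem.Str.count s "G"))
          (PySem.Str.count s "T") - PySem.Str.count s "G") +
      (max (max (max (PySem.Str.count s "A") (PySem.Str.count s "C")) (PySem.Str.count s "G"))
          (PySem.Str.count s "T") - PySem.Str.count s "T") ≠ PySem.Str.count s "?"
  · rw [if_pos hguard, if_pos hguard]
  · rw [if_neg hguard, if_neg hguard]
    push Not at hguard
    obtain ⟨-, htot⟩ := hguard
    rw [str_count_q] at htot
    rw [chain_eq_fill]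
    rw [pvWhile_of_count_zero _ (fill_count_zero s.toList _ _ _ _ htot.symm)]
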